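-- pv_equiv track=rewrite | github.com/wu5040/PR_Course | exp/kNN/kNNCut.py | MyFix
-- ===== SOURCE A (Python) =====
-- def MyFix(dataMat1,dataMat0):
--     i=j=0
--     len1=len(dataMat1)
--     len0=len(dataMat0)
--
--     dataMat=[0]*(len1+len0)
--     labelVec=[0]*(len1+len0)
--
--     while(i<len1 or j<len0):
--         if i<len1:
--             dataMat[i+j]=dataMat1[i]
--             labelVec[i+j]=1
--             i+=1
--         if j<len0:
--             dataMat[i+j]=dataMat0[j]
--             labelVec[i+j]=0
--             j+=1
--     return dataMat,labelVec
-- ===== SOURCE B (Python) =====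
-- def MyFix(dataMat1, dataMat0):
--     n = min(len(dataMat1), len(dataMat0))
--     dataMat = []
--     labelVec = []
--     for x, y in zip(dataMat1[:n], dataMat0[:n]):
--         dataMat.append(x)
--         dataMat.append(y)
--         labelVec.append(1)
--         labelVec.append(0)
--     if len(dataMat1) > n:
--         tail = dataMat1[n:]
--         dataMat.extend(tail)
--         labelVec.extend([1] * len(tail))
--     else:
--         tail = dataMat0[n:]
--         dataMat.extend(tail)
--         labelVec.extend([0] * len(tail))
--     return dataMat, labelVec
-- ===== Notes on version B (the rewrite author's own statement) =====
-- stated objective: simpler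
-- what changed: Replaces the dual-counter while loop that overwrites two preallocated zero-filled arrays with a zip pass over the common prefix that appends (x,1),(y,0) pairs, followed by one bulk extend with the longer input's tail and its constant labels.
import Mathlib
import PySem

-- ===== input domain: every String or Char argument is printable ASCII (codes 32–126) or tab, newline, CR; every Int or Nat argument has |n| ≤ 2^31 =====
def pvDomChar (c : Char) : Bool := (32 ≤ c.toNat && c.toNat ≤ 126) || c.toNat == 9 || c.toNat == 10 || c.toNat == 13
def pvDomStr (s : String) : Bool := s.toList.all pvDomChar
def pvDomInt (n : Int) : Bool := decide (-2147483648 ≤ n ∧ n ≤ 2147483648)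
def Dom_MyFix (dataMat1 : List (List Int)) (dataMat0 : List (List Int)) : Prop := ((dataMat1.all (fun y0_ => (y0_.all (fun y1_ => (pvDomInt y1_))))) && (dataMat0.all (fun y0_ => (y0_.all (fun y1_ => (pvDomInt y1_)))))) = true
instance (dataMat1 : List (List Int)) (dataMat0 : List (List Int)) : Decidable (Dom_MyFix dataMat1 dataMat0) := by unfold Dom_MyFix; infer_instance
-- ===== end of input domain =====

-- B replaces A's dual-counter while loop over preallocated zero arrays with a
-- zip pass over the common prefix plus one bulk tail extend (simpler decomposition, same cost).


-- ===== PORT A =====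
-- the while loop: state (i, j, dataMat, labelVec); both ifs guarded exactly as in Python,
-- the second if reads the ALREADY incremented i (i')
def MyFixLoop (d1 d0 : List (List Int)) (i j : Nat)
    (dm : List (List Int)) (lv : List Int) : List (List Int) × List Int :=
  if i < d1.length ∨ j < d0.length then
    let s1 := if i < d1.length then (i + 1, dm.set (i + j) d1[i]!, lv.set (i + j) 1) else (i, dm, lv)
    let i' := s1.1
    let s2 := if j < d0.length then (j + 1, s1.2.1.set (i' + j) d0[j]!, s1.2.2.set (i' + j) 0)
              else (j, s1.2.1, s1.2.2)
    MyFixLoop d1 d0 i' s2.1 s2.2.1 s2.2.2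
  else (dm, lv)
termination_by (d1.length - i) + (d0.length - j)
decreasing_by
  rename_i h
  by_cases h1 : i < d1.length <;> by_cases h0 : j < d0.length <;> simp [h1, h0] <;> omega

def MyFix (dataMat1 : List (List Int)) (dataMat0 : List (List Int)) : List (List Int) × List Int :=
  let len1 := dataMat1.length
  let len0 := dataMat0.length
  let dataMat := List.replicate (len1 + len0) ([] : List Int)  -- [0]*(len1+len0): placeholder rows, all overwritten
  let labelVec := List.replicate (len1 + len0) (0 : Int)
  MyFixLoop dataMat1 dataMat0 0 0 dataMat labelVec

-- ===== PORT B =====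
def MyFix_alt (dataMat1 : List (List Int)) (dataMat0 : List (List Int)) : List (List Int) × List Int :=
  let n := min dataMat1.length dataMat0.length
  let acc := ((dataMat1.take n).zip (dataMat0.take n)).foldl
    (fun (acc : List (List Int) × List Int) p =>
      (acc.1 ++ [p.1, p.2], acc.2 ++ [(1 : Int), (0 : Int)])) ([], [])
  if dataMat1.length > n then
    let tail := dataMat1.drop n
    (acc.1 ++ tail, acc.2 ++ List.replicate tail.length (1 : Int))
  else
    let tail := dataMat0.drop n
    (acc.1 ++ tail, acc.2 ++ List.replicate tail.length (0 : Int))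

-- ===== PRECONDITION & SPEC =====
def Spec_MyFix (dataMat1 : List (List Int)) (dataMat0 : List (List Int)) (out : List (List Int) × List Int) : Prop := out = MyFix_alt dataMat1 dataMat0
instance (dataMat1 : List (List Int)) (dataMat0 : List (List Int)) (out : List (List Int) × List Int) : Decidable (Spec_MyFix dataMat1 dataMat0 out) := by unfold Spec_MyFix; infer_instance

-- ===== CLAIM (what is proved, stated in full; the proofs are below) =====
def Claim_equal_MyFix : Prop := ∀ (dataMat1 : List (List Int)) (dataMat0 : List (List Int)), Dom_MyFix dataMat1 dataMat0 → Spec_MyFix dataMat1 dataMat0 (MyFix dataMat1 dataMat0)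

-- ===== LEMMAS AND PROOFS =====

/-- proof-side spec: strict interleaving with the leftover tail appended. -/
def inter {α : Type} : List α → List α → List α
  | x :: a, y :: b => x :: y :: inter a b
  | [], b => b
  | a, [] => a

/-- proof-side spec of the label vector: a ones and b zeros, interleaved the same way. -/
def interL : Nat → Nat → List Int
  | a + 1, b + 1 => 1 :: 0 :: interL a b
  | a, 0 => List.replicate a 1
  | 0, b => List.replicate b 0

theorem take_set_succ {α : Type} (l : List α) (k : Nat) (v : α) (h : k < l.length) :
    (l.set k v).take (k + 1) = l.take k ++ [v] := by
  induction l generalizing k with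
  | nil => simp at h
  | cons x xs ih =>
    cases k with
    | zero => simp
    | succ k =>
      have := ih k (by simpa using h)
      simp [List.set, List.take_succ_cons, this]

theorem drop_eq_getElemBang_cons (l : List (List Int)) (i : Nat) (h : i < l.length) :
    l.drop i = l[i]! :: l.drop (i + 1) := by
  rw [getElem!_pos l i h]
  exact List.drop_eq_getElem_cons h

theorem inter_nil_right {α : Type} (a : List α) : inter a [] = a := by
  cases a <;> rfl

theorem interL_right (b : Nat) : interL 0 b = List.replicate b 0 := by
  cases b <;> rfl

theorem interL_left (a : Nat) : interL a 0 = List.replicate a 1 := by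
  cases a <;> rfl

theorem loop_spec (d1 d0 : List (List Int)) :
    ∀ i j (dm : List (List Int)) (lv : List Int),
      dm.length = d1.length + d0.length → lv.length = d1.length + d0.length →
      i ≤ d1.length → j ≤ d0.length →
      MyFixLoop d1 d0 i j dm lv =
        (dm.take (i + j) ++ inter (d1.drop i) (d0.drop j),
         lv.take (i + j) ++ interL (d1.length - i) (d0.length - j)) := by
  intro i j
  induction hm : (d1.length - i) + (d0.length - j) using Nat.strong_induction_on
    generalizing i j with
  | _ m ih =>
  intro dm lv hdm hlv hi hj
  rw [MyFixLoop]
  by_cases h1 : i < d1.length <;> by_cases h0 : j < d0.length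
  · -- both
    simp only [h1, h0, if_true, or_true]
    rw [ih ((d1.length - (i+1)) + (d0.length - (j+1))) (by omega) (i+1) (j+1) rfl _ _
        (by simpa using hdm) (by simpa using hlv) (by omega) (by omega)]
    have e1 : i + 1 + j = (i + j) + 1 := by omega
    have e2 : i + 1 + (j + 1) = (i + j) + 1 + 1 := by omega
    have hij : i + j < dm.length := by omega
    have hij' : i + j < lv.length := by omega
    have hij2 : (i + j) + 1 < (dm.set (i + j) d1[i]!).length := by simpa using (by omega : i + j + 1 < dm.length)
    have hij2' : (i + j) + 1 < (lv.set (i + j) (1 : Int)).length := by simpa using (by omega : i + j + 1 < lv.length)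
    rw [e1, e2]
    rw [take_set_succ _ _ _ hij2, take_set_succ _ _ _ hij2',
        take_set_succ _ _ _ hij, take_set_succ _ _ _ hij']
    rw [drop_eq_getElemBang_cons d1 i h1, drop_eq_getElemBang_cons d0 j h0]
    have hL : d1.length - i = (d1.length - (i+1)) + 1 := by omega
    have hR : d0.length - j = (d0.length - (j+1)) + 1 := by omega
    rw [hL, hR]
    simp [inter, interL]
  · -- only i
    have hj' : j = d0.length := by omega
    simp only [h1, h0, if_true, if_false, or_false]
    rw [ih ((d1.length - (i+1)) + (d0.length - j)) (by omega) (i+1) j rfl _ _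
        (by simpa using hdm) (by simpa using hlv) (by omega) (by omega)]
    have hij : i + j < dm.length := by omega
    have hij' : i + j < lv.length := by omega
    have e1 : i + 1 + j = (i + j) + 1 := by omega
    rw [e1, take_set_succ _ _ _ hij, take_set_succ _ _ _ hij']
    rw [drop_eq_getElemBang_cons d1 i h1]
    subst hj'
    have hL : d1.length - i = (d1.length - (i+1)) + 1 := by omega
    simp [interL_left, inter_nil_right, hL, List.replicate_succ]
  · -- only j
    have hi' : i = d1.length := by omega
    simp only [h1, h0, if_true, if_false, false_or]
    rw [ih ((d1.length - i) + (d0.length - (j+1))) (by omega) i (j+1) rfl _ _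
        (by simpa using hdm) (by simpa using hlv) (by omega) (by omega)]
    have hij : i + j < dm.length := by omega
    have hij' : i + j < lv.length := by omega
    have e1 : i + (j + 1) = (i + j) + 1 := by omega
    rw [e1, take_set_succ _ _ _ hij, take_set_succ _ _ _ hij']
    rw [drop_eq_getElemBang_cons d0 j h0]
    subst hi'
    have hR : d0.length - j = (d0.length - (j+1)) + 1 := by omega
    simp [inter, interL_right, hR, List.replicate_succ]
  · -- done
    have : ¬ (i < d1.length ∨ j < d0.length) := by omega
    simp only [this, if_false]
    have hi' : i = d1.length := by omega
    have hj' : j = d0.length := by omega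
    subst hi'; subst hj'
    simp [inter, interL, List.take_of_length_le, hdm.le, hlv.le]

theorem MyFix_eq_inter (d1 d0 : List (List Int)) :
    MyFix d1 d0 = (inter d1 d0, interL d1.length d0.length) := by
  unfold MyFix
  rw [loop_spec d1 d0 0 0 _ _ (by simp) (by simp) (by omega) (by omega)]
  simp

theorem foldl_zip_spec (a b : List (List Int)) (dm : List (List Int)) (lv : List Int)
    (h : a.length = b.length) :
    (a.zip b).foldl
      (fun (acc : List (List Int) × List Int) p =>
        (acc.1 ++ [p.1, p.2], acc.2 ++ [(1 : Int), (0 : Int)])) (dm, lv) =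
      (dm ++ inter a b, lv ++ interL a.length b.length) := by
  induction a generalizing b dm lv with
  | nil =>
    cases b with
    | nil => simp [inter, interL]
    | cons y b => simp at h
  | cons x a ih =>
    cases b with
    | nil => simp at h
    | cons y b =>
      simp only [List.zip_cons_cons, List.foldl_cons]
      rw [ih b _ _ (by simpa using h)]
      simp [inter, interL]

theorem inter_split (a b : List (List Int)) :
    inter a b = inter (a.take (min a.length b.length)) (b.take (min a.length b.length))
      ++ (a.drop (min a.length b.length) ++ b.drop (min a.length b.length)) := by
  induction a generalizing b with
  | nil => simp [inter]
  | cons x a ih =>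
    cases b with
    | nil => simp [inter]
    | cons y b =>
      have : min (x :: a).length (y :: b).length = (min a.length b.length) + 1 := by
        simp [Nat.succ_min_succ]
      rw [this]
      simp only [List.take_succ_cons, List.drop_succ_cons, inter]
      rw [ih b]
      simp

theorem interL_split (l1 l0 : Nat) :
    interL l1 l0 = interL (min l1 l0) (min l1 l0)
      ++ (List.replicate (l1 - min l1 l0) 1 ++ List.replicate (l0 - min l1 l0) 0) := by
  induction l1 generalizing l0 with
  | zero => cases l0 <;> simp [interL]
  | succ l1 ih =>
    cases l0 with
    | zero => simp [interL_left]
    | succ l0 =>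
      have : min (l1 + 1) (l0 + 1) = (min l1 l0) + 1 := by omega
      rw [this]
      simp only [interL]
      rw [ih l0]
      have e1 : l1 + 1 - (min l1 l0 + 1) = l1 - min l1 l0 := by omega
      have e0 : l0 + 1 - (min l1 l0 + 1) = l0 - min l1 l0 := by omega
      simp [e1, e0]

theorem MyFix_alt_eq_inter (d1 d0 : List (List Int)) :
    MyFix_alt d1 d0 = (inter d1 d0, interL d1.length d0.length) := by
  unfold MyFix_alt
  simp only []
  have hlen : (d1.take (min d1.length d0.length)).length
      = (d0.take (min d1.length d0.length)).length := by
    simp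
  rw [foldl_zip_spec _ _ _ _ hlen]
  have htk : (d1.take (min d1.length d0.length)).length = min d1.length d0.length := by
    simp
  have htk0 : (d0.take (min d1.length d0.length)).length = min d1.length d0.length := by
    simp
  by_cases hgt : d1.length > min d1.length d0.length
  · have h0 : min d1.length d0.length = d0.length := by omega
    simp only [hgt, if_pos, htk, htk0]
    rw [inter_split d1 d0, interL_split d1.length d0.length]
    have : d0.drop (min d1.length d0.length) = [] := by
      apply List.drop_eq_nil_of_le; omega
    have h1 : d0.length - min d1.length d0.length = 0 := by omega
    simp [this, h1, List.length_drop]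
  · have h1 : min d1.length d0.length = d1.length := by omega
    simp only [hgt, if_neg, not_false_iff, htk, htk0]
    rw [inter_split d1 d0, interL_split d1.length d0.length]
    have : d1.drop (min d1.length d0.length) = [] := by
      apply List.drop_eq_nil_of_le; omega
    have h2 : d1.length - min d1.length d0.length = 0 := by omega
    simp [this, h2, List.length_drop]

-- ===== VERDICT (by name: the statement is the Claim_ definition above) =====
theorem MyFix_spec : Claim_equal_MyFix := by
  intro d1 d0 _
  unfold Spec_MyFix
  rw [MyFix_eq_inter, MyFix_alt_eq_inter]
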